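-- pv_equiv track=rewrite | github.com/alexcortesgrimalt/EBIC_Analysis_Tool | code/linear_regions.py | _largest_true_segment
-- ===== SOURCE A (Python) =====
-- def _largest_true_segment(mask):
--     """Return (start_idx, end_idx) of the largest contiguous True segment in mask.
--     If none found, return None.
--     Indices are inclusive (start, end).
--     """
--     best_len = 0
--     best_seg = None
--     n = len(mask)
--     i = 0
--     while i < n:
--         if mask[i]:
--             j = i
--             while j + 1 < n and mask[j + 1]:
--                 j += 1
--             length = j - i + 1
--             if length > best_len:
--                 best_len = length
--                 best_seg = (i, j)
--             i = j + 1
--         else: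
--             i += 1
--     return best_seg
-- ===== SOURCE B (Python) =====
-- def _largest_true_segment(mask):
--     """Return (start_idx, end_idx) of the largest contiguous True segment in mask.
--     If none found, return None.
--     Indices are inclusive (start, end).
--     """
--     segments = []
--     start = None
--     for idx, val in enumerate(mask):
--         if val:
--             if start is None:
--                 start = idx
--         else:
--             if start is not None:
--                 segments.append((start, idx - 1))
--                 start = None
--     if start is not None:
--         segments.append((start, len(mask) - 1))
--     if not segments:
--         return None
--     return max(segments, key=lambda s: s[1] - s[0])
-- ===== Notes on version B (the rewrite author's own statement) =====
-- stated objective: alternative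
-- what changed: B replaces A's fused index-jumping while-loop (inner scan for each run plus best-so-far comparison) with a single enumerate pass that collects all maximal True runs into a list, followed by a separate max-by-length selection (first maximal on ties, matching A's leftmost-longest rule).
import Mathlib
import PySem

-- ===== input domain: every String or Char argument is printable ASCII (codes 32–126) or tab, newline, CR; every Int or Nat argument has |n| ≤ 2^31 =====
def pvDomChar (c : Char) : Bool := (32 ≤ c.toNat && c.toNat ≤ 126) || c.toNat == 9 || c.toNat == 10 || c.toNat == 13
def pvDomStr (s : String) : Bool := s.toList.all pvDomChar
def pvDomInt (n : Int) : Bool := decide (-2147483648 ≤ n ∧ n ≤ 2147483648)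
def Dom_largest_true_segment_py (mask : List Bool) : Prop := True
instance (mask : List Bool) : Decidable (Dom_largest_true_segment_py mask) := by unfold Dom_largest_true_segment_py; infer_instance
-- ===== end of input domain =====

-- B replaces A's fused index-jumping scan with a run-collection pass followed by a separate
-- max-by-length selection (alternative decomposition, same O(n) cost).

-- ===== PORT A =====
-- inner while loop of A: advance j while j + 1 < n and mask[j + 1]
-- (the Nat fuel only totalizes the while loop — it is always called with enough fuel to run out
--  the loop condition; indices passed to pyGet? are always in range, so `.getD false` only totalizes)
def pvRunEnd (mask : List Bool) (n : Int) : Nat → Int → Int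
  | 0, j => j
  | fuel + 1, j =>
    if j + 1 < n ∧ (PySem.List.pyGet? mask (j + 1)).getD false = true then
      pvRunEnd mask n fuel (j + 1)
    else j

-- outer while loop of A (fuel-totalized the same way)
def pvLoopA (mask : List Bool) (n : Int) : Nat → Int → Int → Option (Int × Int) → Option (Int × Int)
  | 0, _, _, best_seg => best_seg
  | fuel + 1, i, best_len, best_seg =>
    if i < n then
      if (PySem.List.pyGet? mask i).getD false = true then
        let j := pvRunEnd mask n mask.length i
        let length := j - i + 1
        if length > best_len then pvLoopA mask n fuel (j + 1) length (some (i, j))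
        else pvLoopA mask n fuel (j + 1) best_len best_seg
      else pvLoopA mask n fuel (i + 1) best_len best_seg
    else best_seg

def largest_true_segment_py (mask : List Bool) : Option (Int × Int) :=
  pvLoopA mask (mask.length : Int) (mask.length + 1) 0 0 none

-- ===== PORT B =====
-- B's enumerate loop: collect all maximal True runs as inclusive (start, end) pairs;
-- the trailing `if start is not None: append (start, n-1)` is the [] case.
def pvRunsGo (n : Int) : List (Int × Bool) → Option Int → List (Int × Int) → List (Int × Int)
  | [], none, acc => acc
  | [], some s, acc => acc ++ [(s, n - 1)]
  | (idx, val) :: rest, start, acc =>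
    if val then
      match start with
      | none => pvRunsGo n rest (some idx) acc
      | some s => pvRunsGo n rest (some s) acc
    else
      match start with
      | some s => pvRunsGo n rest none (acc ++ [(s, idx - 1)])
      | none => pvRunsGo n rest none acc

-- max(segments, key=lambda s: s[1] - s[0]): first maximal element (strict-greater replacement)
def pvMaxByKey : List (Int × Int) → (Int × Int) → (Int × Int)
  | [], best => best
  | x :: rest, best =>
    if x.2 - x.1 > best.2 - best.1 then pvMaxByKey rest x else pvMaxByKey rest best

def largest_true_segment_py_alt (mask : List Bool) : Option (Int × Int) :=
  match pvRunsGo (mask.length : Int) (PySem.List.enumerate mask 0) none [] with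
  | [] => none
  | s :: rest => some (pvMaxByKey rest s)

-- ===== PRECONDITION & SPEC =====
def Spec_largest_true_segment_py (mask : List Bool) (out : Option (Int × Int)) : Prop := out = largest_true_segment_py_alt mask
instance (mask : List Bool) (out : Option (Int × Int)) : Decidable (Spec_largest_true_segment_py mask out) := by unfold Spec_largest_true_segment_py; infer_instance

-- ===== CLAIM (what is proved, stated in full; the proofs are below) =====
def Claim_equal_largest_true_segment_py : Prop := ∀ (mask : List Bool), Dom_largest_true_segment_py mask → Spec_largest_true_segment_py mask (largest_true_segment_py mask)

-- ===== LEMMAS AND PROOFS =====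

-- structural (list-indexed) run collector: the common reference both ports are reduced to
def pvRunsL : List Bool → Int → Option Int → List (Int × Int)
  | [], _, none => []
  | [], i, some s => [(s, i - 1)]
  | b :: rest, i, none => if b then pvRunsL rest (i + 1) (some i) else pvRunsL rest (i + 1) none
  | b :: rest, i, some s =>
    if b then pvRunsL rest (i + 1) (some s) else (s, i - 1) :: pvRunsL rest (i + 1) none

-- A's best-so-far selection replayed over a run list
def pvSel : List (Int × Int) → Int → Option (Int × Int) → Option (Int × Int)
  | [], _, bs => bs
  | (s, e) :: rest, bl, bs =>
    if e - s + 1 > bl then pvSel rest (e - s + 1) (some (s, e)) else pvSel rest bl bs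

theorem pvGetSome (mask : List Bool) (i : Int) (h0 : 0 ≤ i) (h1 : i.toNat < mask.length) :
    PySem.List.pyGet? mask i = some mask[i.toNat] :=
  PySem.List.pyGet?_eq_some_getElem mask h0 (by omega)

theorem pvRunEnd_le (mask : List Bool) (n : Int) (fuel : Nat) :
    ∀ j : Int, j ≤ pvRunEnd mask n fuel j := by
  induction fuel with
  | zero => intro j; simp [pvRunEnd]
  | succ fuel ih =>
    intro j
    rw [pvRunEnd]
    split
    · have := ih (j + 1); omega
    · omega

theorem pvRunEnd_lt (mask : List Bool) (n : Int) (fuel : Nat) :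
    ∀ j : Int, j < n → pvRunEnd mask n fuel j < n := by
  induction fuel with
  | zero => intro j h; simpa [pvRunEnd] using h
  | succ fuel ih =>
    intro j h
    rw [pvRunEnd]
    split
    · next hc => exact ih (j + 1) hc.1
    · exact h

theorem pvRunsGo_eq_pvRunsL (l : List Bool) (i : Int) (st : Option Int)
    (acc : List (Int × Int)) (n : Int) (hn : n = i + l.length) :
    pvRunsGo n (PySem.List.enumerate l i) st acc = acc ++ pvRunsL l i st := by
  induction l generalizing i st acc with
  | nil =>
    cases st with
    | none => simp [PySem.List.enumerate, pvRunsGo, pvRunsL]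
    | some s =>
      simp only [List.length_nil, Int.natCast_zero, add_zero] at hn
      simp [PySem.List.enumerate, pvRunsGo, pvRunsL, hn]
  | cons b rest ih =>
    have hn' : n = (i + 1) + (rest.length : Int) := by
      simp only [List.length_cons] at hn; push_cast at hn ⊢; omega
    rw [PySem.List.enumerate_cons]
    cases b with
    | true =>
      cases st with
      | none => simp [pvRunsGo, pvRunsL, ih (i + 1) (some i) acc hn']
      | some s => simp [pvRunsGo, pvRunsL, ih (i + 1) (some s) acc hn']
    | false =>
      cases st with
      | none => simp [pvRunsGo, pvRunsL, ih (i + 1) none acc hn']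
      | some s =>
        simp [pvRunsGo, pvRunsL, ih (i + 1) none (acc ++ [(s, i - 1)]) hn']

theorem pvSel_eq_maxByKey (rest : List (Int × Int)) (best : Int × Int) :
    pvSel rest (best.2 - best.1 + 1) (some best) = some (pvMaxByKey rest best) := by
  induction rest generalizing best with
  | nil => simp [pvSel, pvMaxByKey]
  | cons x xs ih =>
    obtain ⟨s, e⟩ := x
    by_cases h : e - s > best.2 - best.1
    · have h' : e - s + 1 > best.2 - best.1 + 1 := by omega
      simp only [pvSel, pvMaxByKey, if_pos h', if_pos h]
      exact ih (s, e)
    · have h' : ¬ (e - s + 1 > best.2 - best.1 + 1) := by omega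
      simp only [pvSel, pvMaxByKey, if_neg h', if_neg h]
      exact ih best

theorem pvRunsL_head_le (l : List Bool) (i : Int) (st : Option Int)
    (hst : ∀ s0, st = some s0 → s0 < i) (p : Int × Int) (rest : List (Int × Int))
    (h : pvRunsL l i st = p :: rest) : p.1 ≤ p.2 := by
  induction l generalizing i st p rest with
  | nil =>
    cases st with
    | none => simp [pvRunsL] at h
    | some s0 =>
      have hs := hst s0 rfl
      simp only [pvRunsL, List.cons.injEq] at h
      obtain ⟨h1, -⟩ := h
      subst h1
      simp
      omega
  | cons b tail ih =>
    cases b with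
    | true =>
      cases st with
      | none =>
        simp only [pvRunsL, if_true] at h
        exact ih (i + 1) (some i) (by intro s0 hs0; cases hs0; omega) p rest h
      | some s0 =>
        simp only [pvRunsL, if_true] at h
        exact ih (i + 1) (some s0) (by intro s1 hs1; cases hs1; have := hst s0 rfl; omega) p rest h
    | false =>
      cases st with
      | none =>
        simp only [pvRunsL, Bool.false_eq_true, if_false] at h
        exact ih (i + 1) none (by intro s0 hs0; cases hs0) p rest h
      | some s0 =>
        have hs := hst s0 rfl
        simp only [pvRunsL, Bool.false_eq_true, if_false, List.cons.injEq] at h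
        obtain ⟨h1, -⟩ := h
        subst h1
        simp
        omega

theorem pvRunsL_run (mask : List Bool) (fuel : Nat) :
    ∀ j s : Int, 0 ≤ j → j < (mask.length : Int) →
    ((mask.length : Int) - (j + 1)).toNat ≤ fuel →
    pvRunsL (mask.drop (j + 1).toNat) (j + 1) (some s)
      = (s, pvRunEnd mask (mask.length : Int) fuel j)
        :: pvRunsL (mask.drop (pvRunEnd mask (mask.length : Int) fuel j + 1).toNat)
             (pvRunEnd mask (mask.length : Int) fuel j + 1) none := by
  induction fuel with
  | zero =>
    intro j s h0 hj hf
    have htn : (j + 1).toNat = mask.length := by omega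
    have hre : pvRunEnd mask (mask.length : Int) 0 j = j := rfl
    rw [hre, htn, List.drop_length]
    simp only [pvRunsL]
    norm_num
  | succ fuel ih =>
    intro j s h0 hj hf
    rw [pvRunEnd]
    split
    · next hc =>
      obtain ⟨hlt, hget⟩ := hc
      have h1 : (j + 1).toNat < mask.length := by omega
      rw [pvGetSome mask (j + 1) (by omega) h1] at hget
      simp only [Option.getD_some] at hget
      have hdrop : mask.drop (j + 1).toNat = mask[(j + 1).toNat] :: mask.drop ((j + 1).toNat + 1) :=
        List.drop_eq_getElem_cons h1
      have htn : ((j + 1) + 1).toNat = (j + 1).toNat + 1 := by omega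
      rw [hdrop, hget]
      simp only [pvRunsL, if_true]
      have := ih (j + 1) s (by omega) hlt (by omega)
      rw [htn] at this
      exact this
    · next hc =>
      have hj1 : j + 1 ≤ (mask.length : Int) := by omega
      by_cases he : j + 1 = (mask.length : Int)
      · have htn : (j + 1).toNat = mask.length := by omega
        rw [htn]
        simp [pvRunsL]
      · have hlt : j + 1 < (mask.length : Int) := by omega
        have h1 : (j + 1).toNat < mask.length := by omega
        have hfalse : mask[(j + 1).toNat] = false := by
          by_contra hcon
          exact hc ⟨hlt, by rw [pvGetSome mask (j + 1) (by omega) h1]; simpa using hcon⟩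
        have hdrop : mask.drop (j + 1).toNat = mask[(j + 1).toNat] :: mask.drop ((j + 1).toNat + 1) :=
          List.drop_eq_getElem_cons h1
        conv_lhs => rw [hdrop, hfalse]
        conv_rhs => rw [hdrop, hfalse]
        simp only [pvRunsL, Bool.false_eq_true, if_false]
        norm_num

theorem pvLoopA_eq_pvSel (mask : List Bool) (fuel : Nat) :
    ∀ (i bl : Int) (bs : Option (Int × Int)), 0 ≤ i →
    ((mask.length : Int) - i).toNat < fuel →
    pvLoopA mask (mask.length : Int) fuel i bl bs
      = pvSel (pvRunsL (mask.drop i.toNat) i none) bl bs := by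
  induction fuel with
  | zero => intro i bl bs h0 hf; exact absurd hf (by omega)
  | succ fuel ih =>
    intro i bl bs h0 hf
    rw [pvLoopA]
    split
    · next hi =>
      have hiN : i.toNat < mask.length := by omega
      have hdrop : mask.drop i.toNat = mask[i.toNat] :: mask.drop (i.toNat + 1) :=
        List.drop_eq_getElem_cons hiN
      have htn : (i + 1).toNat = i.toNat + 1 := by omega
      by_cases hv : mask[i.toNat] = true
      · rw [if_pos (by rw [pvGetSome mask i h0 hiN]; simpa using hv)]
        set J := pvRunEnd mask (mask.length : Int) mask.length i with hJ
        have hJle : i ≤ J := pvRunEnd_le mask _ mask.length i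
        have hJlt : J < (mask.length : Int) := pvRunEnd_lt mask _ mask.length i hi
        have hrhs : pvRunsL (mask.drop i.toNat) i none
            = (i, J) :: pvRunsL (mask.drop (J + 1).toNat) (J + 1) none := by
          rw [hdrop, hv]
          simp only [pvRunsL, if_true]
          rw [← htn]
          exact pvRunsL_run mask mask.length i i h0 hi (by omega)
        rw [hrhs]
        simp only [pvSel]
        split
        · exact ih (J + 1) (J - i + 1) (some (i, J)) (by omega) (by omega)
        · exact ih (J + 1) bl bs (by omega) (by omega)
      · rw [if_neg (by rw [pvGetSome mask i h0 hiN]; simpa using hv)]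
        have hrhs : pvRunsL (mask.drop i.toNat) i none
            = pvRunsL (mask.drop (i + 1).toNat) (i + 1) none := by
          rw [hdrop, eq_false_of_ne_true hv, htn]
          simp [pvRunsL]
        rw [hrhs]
        exact ih (i + 1) bl bs (by omega) (by omega)
    · next hi =>
      have : mask.drop i.toNat = [] := List.drop_eq_nil_of_le (by omega)
      rw [this]
      simp [pvRunsL, pvSel]

-- ===== VERDICT (by name: the statement is the Claim_ definition above) =====
theorem largest_true_segment_py_spec : Claim_equal_largest_true_segment_py := by
  intro mask _
  unfold Spec_largest_true_segment_py largest_true_segment_py largest_true_segment_py_alt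
  rw [pvLoopA_eq_pvSel mask (mask.length + 1) 0 0 none le_rfl (by omega)]
  rw [pvRunsGo_eq_pvRunsL mask 0 none [] (mask.length : Int) (by simp)]
  simp only [Int.toNat_zero, List.drop_zero, List.nil_append]
  cases hr : pvRunsL mask 0 none with
  | nil => simp [pvSel]
  | cons p rest =>
    obtain ⟨s, e⟩ := p
    have hle : s ≤ e :=
      pvRunsL_head_le mask 0 none (by intro s0 hs0; cases hs0) (s, e) rest hr
    simp only [pvSel, if_pos (by omega : e - s + 1 > 0)]
    exact pvSel_eq_maxByKey rest (s, e)
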